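/- GENERATED by tools/from_farm_form.py from prooffarm-gif/accepted/DGifGetExtension.1/Lemmas.lean (a worked proof of the farm's unit `DGifGetExtension.1`,
   accepted by the verdict) — do not edit. -/
import Gif.Spec.Units.DGifGetExtension_1
import Gif.Spec.AllSegs

open X86 X86.User Asan ProgX.Base ProgX.Base.Spec Gif.Spec

set_option maxRecDepth 4000
set_option maxHeartbeats 4000000

namespace Gif.Spec.DGifGetExtension_1

/-- **At 109B28H (ret4), `InternalRead(gif, &Buf, 1)` has returned**: `Body`, `eax = k ≤ 1` the bytes delivered, and `k = 1` means
the reader advanced by exactly one byte. -/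
structure ge1_AtRet4 (H : Heap) (rest : List Obj) (frames : List (Nat × FrameLayout)) (F : Forest) (R : Rd) (u₀ e : State)
    (ret : Word) (v : State) : Prop where
  body : DGifGetExtension.Body Gif.L.DGifGetExtension.ret4 H rest frames F R u₀ e ret v
  count : (v.reg .rax).toNat ≤ 1
  adv : (v.reg .rax).toNat = 1 → rem R v.mem + 1 = rem R e.mem

/-- **109ACAH … the call of InternalRead … 109B28H (ret4)** (dgif_lib.c:572-582): the checked loads of `gif.Private` and
`pv.FileState` (`= 8` by `Shape.state`: the NOT_READABLE arm 109AE8H … 109AFBH is dead, the walker prunes it from the load given as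
a fact; the `Done` disjunct of the exit is never used), then `InternalRead(gif, &Buf, 1)` into the frame's object `Buf`. -/
theorem ge1_seg_call (Lay : Layout) (hLay : Lay.hi = 0x1000000) (μ : Microarch) (hμ : UserX.MicroOK μ) (u₀ : State)
    (hcode : HasCodeNat Lay u₀ Gif.L.DGifGetExtension.entry Gif.Code.code_DGifGetExtension.nat Gif.L.DGifGetExtension.size)
    (H : Heap) (rest : List Obj) (frames : List (Nat × FrameLayout)) (F : Forest) (R : Rd) (e : State) (ret : Word)
    (h_InternalRead : Calls Lay μ ProgX.Base.WayInv (ProgX.Base.conv u₀) Gif.L.InternalRead.entry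
      (Gif.Spec.InternalRead.spec H rest (DGifGetExtension.framesIn frames e) F R 1))
    (h_asan_load8_noabort : Asan.SmallCheck Lay μ ProgX.Base.WayInv (ProgX.Base.CodeOK u₀) [.rax, .rcx, .rdx] 8
      ProgX.Base.L.__asan_load8_noabort.entry)
    (h_asan_load4_noabort : Asan.SmallCheck Lay μ ProgX.Base.WayInv (ProgX.Base.CodeOK u₀) [.rax, .rcx, .rdx] 4
      ProgX.Base.L.__asan_load4_noabort.entry)
    (v : State) (hat : DGifGetExtension.Start H rest frames F R u₀ e ret v) :
    ReachVia Lay μ ProgX.Base.WayInv v (fun w => DGifGetExtension.Done H rest frames F R u₀ e ret w ∨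
      ge1_AtRet4 H rest frames F R u₀ e ret w) := by
  -- THE PRELUDE: the entry assertion `Start` = `Body` + `rdi = gif` + the reader where it was
  have hrem_eq := hat.rem_eq
  obtain ⟨hbody, c_rdi, -⟩ := hat
  have he := hbody.entry
  v_entry he
  obtain ⟨henv, hrdi, hcodep, hextp, hdisj⟩ := hbody.pre
  have w_rip := hbody.rip
  have c_rsp : v.reg .rsp = e.reg .rsp - 104 := hbody.rsp
  have c_rbx : v.reg .rbx = e.reg .rdi := hbody.rbx
  have w_kept : RegsKept [.rsp] v v := RegsKept.refl _ _
  have w_eq : Mem.EqOn ProgX.Base.L.textLo ProgX.Base.L.textHi u₀.mem v.mem := ProgX.Base.conv_code_eqOn hbody.code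
  have hdf := (show abiInv _ from hbody.abi).1
  have hmx := (show abiInv _ from hbody.abi).2
  have hsse := ProgX.Base.sseOK_of_abiInv hbody.abi
  have k_r14 : v.mem.readLE (e.reg .rsp - 8) 8 = (e.reg .r14).toNat := hbody.slot_r14
  have k_r13 : v.mem.readLE (e.reg .rsp - 16) 8 = (e.reg .r13).toNat := hbody.slot_r13
  have k_r12 : v.mem.readLE (e.reg .rsp - 24) 8 = (e.reg .r12).toNat := hbody.slot_r12
  have k_rbp : v.mem.readLE (e.reg .rsp - 32) 8 = (e.reg .rbp).toNat := hbody.slot_rbp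
  have k_rbx : v.mem.readLE (e.reg .rsp - 40) 8 = (e.reg .rbx).toNat := hbody.slot_rbx
  have k_ra : UInt64.ofNat (v.mem.readLE (e.reg .rsp) 8) = ret := hbody.slot_ra
  have hsame : Mem.SameExcept
    [⟨(e.reg .rsp).toNat - 432, (e.reg .rsp).toNat⟩,
     shadowSpan ((e.reg .rsp).toNat - 104) ((e.reg .rsp).toNat - 40),
     ⟨F.pv + 88, F.pv + 344⟩,
     ⟨(e.reg .rsi).toNat, (e.reg .rsi).toNat + 4⟩,
     ⟨(e.reg .rdx).toNat, (e.reg .rdx).toNat + 8⟩,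
     ⟨F.gif + 96, F.gif + 100⟩,
     ⟨R.cur, R.cur + 8⟩] e.mem v.mem := hbody.same
  -- where the cursor, gif and pv are, as numbers
  have hcur := henv.ctx.cursor_range henv.heap.inv.shadow
  have hgin := henv.ok.owns.inside henv.heap.inv.heap (o := (F.gif, 120)) List.mem_cons_self
  have hpin := henv.ok.owns.inside henv.heap.inv.heap (o := (F.pv, 24936)) (List.mem_cons_of_mem _ List.mem_cons_self)
  have hbase := henv.heap.base
  simp only at hgin hpin
  rw [hbase] at hgin hpin
  obtain ⟨hg1, -, -, -, hg2⟩ := hgin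
  obtain ⟨hp1, -, -, -, hp2⟩ := hpin
  -- the two loads, as facts about the present memory in the walker's form
  have hpriv := hbody.ok.shape.priv
  have hstate := hbody.ok.shape.state
  simp only [gfield] at hpriv hstate
  have l_priv : v.mem.readLE (e.reg .rdi + 0x70) 8 = F.pv := by
    rw [rd_eq_readLE v.mem (e.reg .rdi + 0x70) (F.gif + 112) 8 (by u_omega)]
    exact hpriv
  have l_state : v.mem.readLE (UInt64.ofNat F.pv) 4 = 8 := by
    rw [rd_eq_readLE v.mem (UInt64.ofNat F.pv) F.pv 4 (by u_omega)]
    exact hstate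
  -- gif and pv are live under the body's frames: what the check goals ask
  have hgl : LiveIn (H.liveObjs ++ rest) (DGifGetExtension.framesIn frames e) F.gif 120 :=
    hbody.ok.gif_live.liveIn rest _ (Nat.le_refl _) (Nat.le_refl _)
  have hpl : LiveIn (H.liveObjs ++ rest) (DGifGetExtension.framesIn frames e) F.pv 24936 :=
    hbody.ok.pv_live.liveIn rest _ (Nat.le_refl _) (Nat.le_refl _)
  -- THE WALK, to the call's return address (or, NOT_READABLE, to the epilogue)
  u_walk hcode [hμ.vendor] until [Gif.L.DGifGetExtension.ret4, Gif.L.DGifGetExtension.at_109afb] span [ProgX.Base.L.textLo, ProgX.Base.L.textHi] side (v_side)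
  case check_109ace =>
    -- dgif_lib.c:572 the load of `gif.Private`: 8 bytes inside gif
    have hun : ShadowUntouched v.mem s_109ace.mem := by v_untouched
    exact hgl.accSmall hbody.inv.shadow hun _ 8 (by decide) (by u_omega) (by u_omega)
  case check_109ada =>
    -- dgif_lib.c:575 the load of `pv.FileState`: 4 bytes inside pv
    have hun : ShadowUntouched v.mem s_109ada.mem := by v_untouched
    exact hpl.accSmall hbody.inv.shadow hun _ 4 (by decide) (by u_omega) (by u_omega)
  case call_inv =>
    refine ProgX.Base.abiInv_of ?_ ?_
    · rw [w_flags, X86.User.df_setStatus]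
      exact w_df_109ada
    · rw [w_mxcsr]
      exact hmx
  case pre_109b23 =>
    -- INTERNALREAD'S PRECONDITION. The environment for the frame list with the own frame in front: only the return address was
    -- pushed since `v`
    have hs : Mem.SameExcept [⟨(e.reg .rsp).toNat - 432, (e.reg .rsp).toNat - 104⟩] v.mem s_109b23.mem := by
      rw [w_mem]
      u_same
    have henv' : Env H rest (DGifGetExtension.framesIn frames e) F R s_109b23 := by
      refine henv.at_call hbody.inv hbody.ok hs (by omega) (by omega) ?_ ?_ ?_
      · rw [w_rsp]
        u_omega
      · rw [w_rsp]
        u_omega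
      · rw [w_rsp]
        u_omega
    -- the buffer is the frame's object `Buf` (`[rsp + 0x20]` = base + 32, 1 byte), named by its numbers
    have ho : (⟨(e.reg .rsp).toNat - 104 + 32, 1, .stack⟩ : Obj) ∈
        Gif.Frames.DGifGetExtension.objsAt ((e.reg .rsp).toNat - 104) := List.mem_cons_self
    have hsz : Gif.Frames.DGifGetExtension.size = 64 := rfl
    have hb : (e.reg .rsp).toNat - 104 + Gif.Frames.DGifGetExtension.size ≤ (e.reg .rsp).toNat + 8 := by
      rw [hsz]
      omega
    have hbuf : BufOK H rest (DGifGetExtension.framesIn frames e) F R (s_109b23.reg .rsi).toNat 1 := by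
      apply BufOK.own henv.heap henv.ctx hbody.inv hb ho
      · rw [w_rsi]
        u_omega
      · rw [w_rsi]
        u_omega
    -- the clauses: `Env`, `rdi = gif`, `edx = 1`, `1 ≤ 1`, `1 < 2 ^ 31`, `BufOK`
    refine ⟨henv', ?_, ?_, by decide, by decide, hbuf⟩
    · rw [w_rdi]
      exact hrdi
    · rw [w_rdx]
      decide
  -- 0x109b28 (ret4): INTERNALREAD HAS RETURNED. Its post: `k` bytes delivered
  obtain ⟨k, hk1, hk2, hk3, hk4, hk5, hback⟩ : ReadPost H rest (DGifGetExtension.framesIn frames e) F R 1 s_109b23 s_109b23r := w_post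
  -- the reader at InternalRead's entry is the entry's: only the return address was pushed
  have hs0 : Mem.SameExcept [⟨(e.reg .rsp).toNat - 432, (e.reg .rsp).toNat - 104⟩] v.mem s_109b23.mem := by
    rw [w_mem_109b23]
    u_same
  have hrem0 : rem R s_109b23.mem = rem R e.mem := by
    rw [← hrem_eq]
    apply rem_sameExcept hs0 (by omega)
    intro w hw
    have e := List.mem_singleton.mp hw
    rw [e]
    simp only
    omega
  have e_top : (s_109b23.reg .rsp).toNat + 8 = (e.reg .rsp).toNat - 104 := by
    rw [w_rsp_109b23]
    u_omega
  -- the callee's footprint in terms of `v` (`w_same : SameExcept […] v.mem s_109b23r.mem`)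
  v_after_call w_rsp_109b23 w_mem_109b23
  simp only [w_rsi_109b23] at w_same
  -- THE SLOTS AND THE RETURN ADDRESS, over the pushed return address (first step) and through InternalRead's footprint (second
  -- step: the buffer `Buf`, the cursor, the stack below)
  have hp_r14 : s_109b23.mem.readLE (e.reg .rsp - 8) 8 = (e.reg .r14).toNat := by
    rw [w_mem_109b23]
    u_frame k_r14
  rw [w_mem_109b23] at hp_r14
  have hs_r14 : s_109b23r.mem.readLE (e.reg .rsp - 8) 8 = (e.reg .r14).toNat := by u_frame hp_r14
  have hp_r13 : s_109b23.mem.readLE (e.reg .rsp - 16) 8 = (e.reg .r13).toNat := by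
    rw [w_mem_109b23]
    u_frame k_r13
  rw [w_mem_109b23] at hp_r13
  have hs_r13 : s_109b23r.mem.readLE (e.reg .rsp - 16) 8 = (e.reg .r13).toNat := by u_frame hp_r13
  have hp_r12 : s_109b23.mem.readLE (e.reg .rsp - 24) 8 = (e.reg .r12).toNat := by
    rw [w_mem_109b23]
    u_frame k_r12
  rw [w_mem_109b23] at hp_r12
  have hs_r12 : s_109b23r.mem.readLE (e.reg .rsp - 24) 8 = (e.reg .r12).toNat := by u_frame hp_r12
  have hp_rbp : s_109b23.mem.readLE (e.reg .rsp - 32) 8 = (e.reg .rbp).toNat := by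
    rw [w_mem_109b23]
    u_frame k_rbp
  rw [w_mem_109b23] at hp_rbp
  have hs_rbp : s_109b23r.mem.readLE (e.reg .rsp - 32) 8 = (e.reg .rbp).toNat := by u_frame hp_rbp
  have hp_rbx : s_109b23.mem.readLE (e.reg .rsp - 40) 8 = (e.reg .rbx).toNat := by
    rw [w_mem_109b23]
    u_frame k_rbx
  rw [w_mem_109b23] at hp_rbx
  have hs_rbx : s_109b23r.mem.readLE (e.reg .rsp - 40) 8 = (e.reg .rbx).toNat := by u_frame hp_rbx
  have hp_ra : UInt64.ofNat (s_109b23.mem.readLE (e.reg .rsp) 8) = ret := by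
    rw [w_mem_109b23]
    u_frame k_ra
  rw [w_mem_109b23] at hp_ra
  have hs_ra : UInt64.ofNat (s_109b23r.mem.readLE (e.reg .rsp) 8) = ret := by u_frame hp_ra
  -- the footprint since the entry: InternalRead's windows lie inside the function's stack window and the cursor's
  have hsame1 : Mem.SameExcept
    [⟨(e.reg .rsp).toNat - 432, (e.reg .rsp).toNat⟩,
     shadowSpan ((e.reg .rsp).toNat - 104) ((e.reg .rsp).toNat - 40),
     ⟨F.pv + 88, F.pv + 344⟩,
     ⟨(e.reg .rsi).toNat, (e.reg .rsi).toNat + 4⟩,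
     ⟨(e.reg .rdx).toNat, (e.reg .rdx).toNat + 8⟩,
     ⟨F.gif + 96, F.gif + 100⟩,
     ⟨R.cur, R.cur + 8⟩] e.mem s_109b23r.mem := by u_same
  -- the heap's invariant comes back with the clean stack at the callee's `rsp + 8` = the body's `rsp`
  have hinv1 : HeapInv H rest (DGifGetExtension.framesIn frames e) ((e.reg .rsp).toNat - 104) s_109b23r.mem := by
    rw [← e_top]
    exact hback.inv
  -- THE EXIT ASSERTION: `Body` at `ret4` …
  have hbody1 : DGifGetExtension.Body Gif.L.DGifGetExtension.ret4 H rest frames F R u₀ e ret s_109b23r := {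
    entry := hbody.entry
    pre := hbody.pre
    code_above := hbody.code_above
    ext_above := hbody.ext_above
    rip := w_rip
    rsp := w_rsp
    rbx := (w_kept.get .rbx rfl).trans hbody.rbx
    r13 := (w_kept.get .r13 rfl).trans hbody.r13
    r14 := (w_kept.get .r14 rfl).trans hbody.r14
    rbp := (w_kept.get .rbp rfl).trans hbody.rbp
    r15 := (w_kept.get .r15 rfl).trans hbody.r15
    slot_r14 := hs_r14
    slot_r13 := hs_r13
    slot_r12 := hs_r12
    slot_rbp := hs_rbp
    slot_rbx := hs_rbx
    slot_ra := hs_ra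
    inv := hinv1
    ok := hback.ok
    rem := by
      rw [← hrem0]
      exact hback.rem
    same := hsame1
    code := w_code
    abi := w_inv
  }
  -- … and what is live at `ret4`: the count in `eax`
  refine ReachVia.done (Or.inr ?_)
  exact {
    body := hbody1
    count := by
      rw [hk4]
      exact hk1
    adv := by
      intro h1
      rw [hk4] at h1
      rw [hk5, hrem0]
      rw [hrem0] at hk2
      omega
  }

/-- **109B28H (ret4) … 109B45H / 109AFBH** (dgif_lib.c:582-585): `cmp eax, 1`; one byte read: `AfterRead`; else the checked store of
`gif.Error = D_GIF_ERR_READ_FAILED` (102), `r12d = 0`, and the jump to the epilogue: `Done`. -/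
theorem ge1_seg_tail (Lay : Layout) (hLay : Lay.hi = 0x1000000) (μ : Microarch) (hμ : UserX.MicroOK μ) (u₀ : State)
    (hcode : HasCodeNat Lay u₀ Gif.L.DGifGetExtension.entry Gif.Code.code_DGifGetExtension.nat Gif.L.DGifGetExtension.size)
    (H : Heap) (rest : List Obj) (frames : List (Nat × FrameLayout)) (F : Forest) (R : Rd) (e : State) (ret : Word)
    (h_asan_store4_noabort : Asan.SmallCheck Lay μ ProgX.Base.WayInv (ProgX.Base.CodeOK u₀) [.rax, .rcx, .rdx] 4
      ProgX.Base.L.__asan_store4_noabort.entry)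
    (v : State) (hat : ge1_AtRet4 H rest frames F R u₀ e ret v) :
    ReachVia Lay μ ProgX.Base.WayInv v (fun w => DGifGetExtension.Done H rest frames F R u₀ e ret w ∨
      DGifGetExtension.AfterRead H rest frames F R u₀ e ret w) := by
  -- THE PRELUDE: the entry assertion, as in `ge1_seg_call`
  obtain ⟨hbody, hcount, hadv⟩ := hat
  have he := hbody.entry
  v_entry he
  obtain ⟨henv, hrdi, hcodep, hextp, hdisj⟩ := hbody.pre
  have w_rip := hbody.rip
  have c_rsp : v.reg .rsp = e.reg .rsp - 104 := hbody.rsp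
  have c_rbx : v.reg .rbx = e.reg .rdi := hbody.rbx
  -- `eax` as a variable `z` (the branch fact of `cmp eax, 1` speaks of it)
  obtain ⟨z, c_rax⟩ : ∃ z, v.reg .rax = z := ⟨_, rfl⟩
  rw [c_rax] at hcount hadv
  have w_kept : RegsKept [.rsp] v v := RegsKept.refl _ _
  have w_eq : Mem.EqOn ProgX.Base.L.textLo ProgX.Base.L.textHi u₀.mem v.mem := ProgX.Base.conv_code_eqOn hbody.code
  have hdf := (show abiInv _ from hbody.abi).1
  have hmx := (show abiInv _ from hbody.abi).2
  have hsse := ProgX.Base.sseOK_of_abiInv hbody.abi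
  have k_r14 : v.mem.readLE (e.reg .rsp - 8) 8 = (e.reg .r14).toNat := hbody.slot_r14
  have k_r13 : v.mem.readLE (e.reg .rsp - 16) 8 = (e.reg .r13).toNat := hbody.slot_r13
  have k_r12 : v.mem.readLE (e.reg .rsp - 24) 8 = (e.reg .r12).toNat := hbody.slot_r12
  have k_rbp : v.mem.readLE (e.reg .rsp - 32) 8 = (e.reg .rbp).toNat := hbody.slot_rbp
  have k_rbx : v.mem.readLE (e.reg .rsp - 40) 8 = (e.reg .rbx).toNat := hbody.slot_rbx
  have k_ra : UInt64.ofNat (v.mem.readLE (e.reg .rsp) 8) = ret := hbody.slot_ra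
  have hsame : Mem.SameExcept
    [⟨(e.reg .rsp).toNat - 432, (e.reg .rsp).toNat⟩,
     shadowSpan ((e.reg .rsp).toNat - 104) ((e.reg .rsp).toNat - 40),
     ⟨F.pv + 88, F.pv + 344⟩,
     ⟨(e.reg .rsi).toNat, (e.reg .rsi).toNat + 4⟩,
     ⟨(e.reg .rdx).toNat, (e.reg .rdx).toNat + 8⟩,
     ⟨F.gif + 96, F.gif + 100⟩,
     ⟨R.cur, R.cur + 8⟩] e.mem v.mem := hbody.same
  -- where the cursor and gif are, as numbers
  have hcur := henv.ctx.cursor_range henv.heap.inv.shadow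
  have hgin := henv.ok.owns.inside henv.heap.inv.heap (o := (F.gif, 120)) List.mem_cons_self
  have hbase := henv.heap.base
  simp only at hgin
  rw [hbase] at hgin
  obtain ⟨hg1, -, -, -, hg2⟩ := hgin
  -- gif is live under the body's frames: what the check goal asks
  have hgl : LiveIn (H.liveObjs ++ rest) (DGifGetExtension.framesIn frames e) F.gif 120 :=
    hbody.ok.gif_live.liveIn rest _ (Nat.le_refl _) (Nat.le_refl _)
  -- THE WALK, both arms
  u_walk hcode [hμ.vendor] until [Gif.L.DGifGetExtension.at_109b45, Gif.L.DGifGetExtension.at_109afb] span [ProgX.Base.L.textLo, ProgX.Base.L.textHi] side (v_side)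
  case check_109b31 =>
    -- dgif_lib.c:583 the store of `gif.Error`: 4 bytes inside gif
    have hun : ShadowUntouched v.mem s_109b31.mem := by v_untouched
    exact hgl.accSmall hbody.inv.shadow hun _ 4 (by decide) (by u_omega) (by u_omega)
  · -- 0x109b45 FROM 0x109b2b: one byte was read. Nothing stored since `v`
    have hz : z.toNat = 1 := by
      rw [toNat_part32] at hbr_109b2b
      have e1 : (1 : Nat) % 2 ^ Width.w32.bits = 1 := by decide
      rw [e1] at hbr_109b2b
      omega
    have hbody1 : DGifGetExtension.Body Gif.L.DGifGetExtension.at_109b45 H rest frames F R u₀ e ret s_109b2b := {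
      entry := hbody.entry
      pre := hbody.pre
      code_above := hbody.code_above
      ext_above := hbody.ext_above
      rip := w_rip
      rsp := w_rsp
      rbx := (w_kept.get .rbx rfl).trans hbody.rbx
      r13 := (w_kept.get .r13 rfl).trans hbody.r13
      r14 := (w_kept.get .r14 rfl).trans hbody.r14
      rbp := (w_kept.get .rbp rfl).trans hbody.rbp
      r15 := (w_kept.get .r15 rfl).trans hbody.r15
      slot_r14 := by
        rw [w_mem]
        exact k_r14
      slot_r13 := by
        rw [w_mem]
        exact k_r13
      slot_r12 := by
        rw [w_mem]
        exact k_r12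
      slot_rbp := by
        rw [w_mem]
        exact k_rbp
      slot_rbx := by
        rw [w_mem]
        exact k_rbx
      slot_ra := by
        rw [w_mem]
        exact k_ra
      inv := by
        rw [w_mem]
        exact hbody.inv
      ok := by
        rw [w_mem]
        exact hbody.ok
      rem := by
        rw [w_mem]
        exact hbody.rem
      same := by
        rw [w_mem]
        exact hbody.same
      code := ProgX.Base.conv_code_in w_eq
      abi := by
        refine ProgX.Base.abiInv_of ?_ ?_
        · rw [w_flags, X86.User.df_setStatus]
          exact hdf
        · rw [w_mxcsr]
          exact hmx
    }
    refine ReachVia.done (Or.inr ?_)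
    exact {
      body := hbody1
      rem_eq := by
        rw [w_mem]
        exact hadv hz
    }
  · -- 0x109afb FROM 0x109b43: no byte, `gif.Error = D_GIF_ERR_READ_FAILED` stored, r12d = 0
    -- the two stores since `v`: the check call's return address (stack), then `gif.Error`
    obtain ⟨hinvA, hokA, hremA⟩ := store_stack hbody.inv hbody.ok ⟨hcur.1, hcur.2.1⟩ (e.reg .rsp - 112) 8 1088310
      (by u_omega) (by u_omega)
    obtain ⟨hinvB, hokB, hremB⟩ := store_gif hinvA hokA ⟨hcur.1, hcur.2.1⟩ hbase (e.reg .rdi + 96) 4 102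
      (Or.inr (Or.inr (by u_omega)))
    rw [← w_mem] at hinvB hokB hremB
    have hremF : rem R s_109b43.mem = rem R v.mem := hremB.trans hremA
    have hbody1 : DGifGetExtension.Body Gif.L.DGifGetExtension.at_109afb H rest frames F R u₀ e ret s_109b43 := {
      entry := hbody.entry
      pre := hbody.pre
      code_above := hbody.code_above
      ext_above := hbody.ext_above
      rip := w_rip
      rsp := w_rsp
      rbx := (w_kept.get .rbx rfl).trans hbody.rbx
      r13 := (w_kept.get .r13 rfl).trans hbody.r13
      r14 := (w_kept.get .r14 rfl).trans hbody.r14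
      rbp := (w_kept.get .rbp rfl).trans hbody.rbp
      r15 := (w_kept.get .r15 rfl).trans hbody.r15
      slot_r14 := by
        rw [w_mem]
        u_frame k_r14
      slot_r13 := by
        rw [w_mem]
        u_frame k_r13
      slot_r12 := by
        rw [w_mem]
        u_frame k_r12
      slot_rbp := by
        rw [w_mem]
        u_frame k_rbp
      slot_rbx := by
        rw [w_mem]
        u_frame k_rbx
      slot_ra := by
        rw [w_mem]
        u_frame k_ra
      inv := hinvB
      ok := hokB
      rem := by
        rw [hremF]
        exact hbody.rem
      same := by
        rw [w_mem]
        u_same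
      code := ProgX.Base.conv_code_in w_eq
      abi := by
        refine ProgX.Base.abiInv_of ?_ ?_
        · rw [w_flags]
          exact w_df_109b31
        · rw [w_mxcsr]
          exact hmx
    }
    -- … and the results: GIF_ERROR
    refine ReachVia.done (Or.inl ?_)
    exact {
      body := hbody1
      res := by
        right
        rw [w_r12]
        decide
      ok1 := by
        intro h1
        rw [w_r12] at h1
        exact absurd h1 (by decide)
    }

end Gif.Spec.DGifGetExtension_1
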